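-- pv_equiv track=rewrite | github.com/Aurna-code/rulecraft | src/rulecraft/rulebook/suggest.py | _dominant_key
-- ===== SOURCE A (Python) =====
-- from typing import Any, Iterable, Mapping
--
-- def _dominant_key(counter: Mapping[str, int]) -> str | None:
--     best_key = None
--     best_value = -1
--     for key in sorted(counter):
--         value = int(counter[key])
--         if value > best_value:
--             best_key = key
--             best_value = value
--     return best_key
-- ===== SOURCE B (Python) =====
-- def _dominant_key(counter):
--     best_key = None
--     best_value = -1
--     for key, value in counter.items():
--         value = int(value)
--         if value > best_value or (value == best_value and best_key is not None and key < best_key):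
--             best_key = key
--             best_value = value
--     return best_key
-- ===== Notes on version B (the rewrite author's own statement) =====
-- stated objective: faster
-- what changed: B drops the sort entirely and makes a single linear pass over the dict items, tracking the running maximum value and the smallest key achieving it.
import Mathlib
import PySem

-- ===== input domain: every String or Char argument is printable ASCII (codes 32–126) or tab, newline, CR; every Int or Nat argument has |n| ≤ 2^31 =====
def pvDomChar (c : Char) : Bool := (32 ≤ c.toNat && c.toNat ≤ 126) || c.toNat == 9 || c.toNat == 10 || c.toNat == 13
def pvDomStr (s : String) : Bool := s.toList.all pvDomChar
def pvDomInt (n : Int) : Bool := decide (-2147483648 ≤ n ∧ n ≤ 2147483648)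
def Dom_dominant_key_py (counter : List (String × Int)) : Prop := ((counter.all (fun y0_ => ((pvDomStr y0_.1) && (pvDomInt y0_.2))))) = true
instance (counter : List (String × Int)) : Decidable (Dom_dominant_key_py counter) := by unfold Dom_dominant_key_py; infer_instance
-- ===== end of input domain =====

-- B replaces A's sort-then-scan by a single linear pass tracking the max value and smallest key achieving it (asymptotically faster).


-- ===== PORT A =====
-- loop body of A: value = int(counter[key]); if value > best_value: best_key, best_value = key, value
-- (counter[key] with key drawn from counter's keys never raises, so getD's default 0 is never used)
def dominantStepA (d : PySem.Dict String Int) (acc : Option String × Int) (key : String) : Option String × Int :=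
  let value := d.getD key 0
  if acc.2 < value then (some key, value) else acc

def dominant_key_py (counter : List (String × Int)) : Option String :=
  let d := PySem.Dict.ofList counter
  ((PySem.List.sorted d.keys (fun k => k) false).foldl (dominantStepA d) (none, -1)).1

-- ===== PORT B =====
-- loop body of B: if value > best_value or (value == best_value and best_key is not None and key < best_key)
def dominantStepB (acc : Option String × Int) (kv : String × Int) : Option String × Int :=
  match acc.1 with
  | none => if acc.2 < kv.2 then (some kv.1, kv.2) else acc
  | some bk => if acc.2 < kv.2 ∨ (kv.2 = acc.2 ∧ kv.1 < bk) then (some kv.1, kv.2) else acc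

def dominant_key_py_alt (counter : List (String × Int)) : Option String :=
  ((PySem.Dict.ofList counter).items.foldl dominantStepB (none, -1)).1

-- ===== PRECONDITION & SPEC =====
def Spec_dominant_key_py (counter : List (String × Int)) (out : Option String) : Prop := out = dominant_key_py_alt counter
instance (counter : List (String × Int)) (out : Option String) : Decidable (Spec_dominant_key_py counter out) := by unfold Spec_dominant_key_py; infer_instance

-- ===== CLAIM (what is proved, stated in full; the proofs are below) =====
def Claim_equal_dominant_key_py : Prop := ∀ (counter : List (String × Int)), Dom_dominant_key_py counter → Spec_dominant_key_py counter (dominant_key_py counter)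

-- ===== LEMMAS AND PROOFS =====

-- well-formed accumulator: value is -1 while no key is chosen, ≥ 0 once one is
def accWF (acc : Option String × Int) : Prop :=
  (acc.1 = none → acc.2 = -1) ∧ (∀ bk, acc.1 = some bk → 0 ≤ acc.2)

-- "b is at least as good an accumulator as a" (larger value, or same value and smaller key)
def accLE (a b : Option String × Int) : Prop :=
  match a.1, b.1 with
  | none, _ => True
  | some _, none => False
  | some k, some k' => a.2 < b.2 ∨ (a.2 = b.2 ∧ k' ≤ k)

-- "accumulator b dominates candidate pair x"
def candLE (x : String × Int) (b : Option String × Int) : Prop :=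
  match b.1 with
  | none => False
  | some k' => x.2 < b.2 ∨ (x.2 = b.2 ∧ k' ≤ x.1)

lemma accLE_refl (a : Option String × Int) : accLE a a := by
  unfold accLE; cases h : a.1 <;> simp

lemma accLE_trans {a b c : Option String × Int} (h1 : accLE a b) (h2 : accLE b c) : accLE a c := by
  unfold accLE at *
  cases ha : a.1 <;> cases hb : b.1 <;> cases hc : c.1 <;> simp_all
  rcases h1 with h1 | ⟨h1, h1'⟩ <;> rcases h2 with h2 | ⟨h2, h2'⟩
  · exact Or.inl (lt_trans h1 h2)
  · exact Or.inl (h2 ▸ h1)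
  · exact Or.inl (h1 ▸ h2)
  · exact Or.inr ⟨h1.trans h2, le_trans h2' h1'⟩

lemma candLE_of_candLE_accLE {x : String × Int} {b c : Option String × Int}
    (h1 : candLE x b) (h2 : accLE b c) : candLE x c := by
  unfold candLE accLE at *
  cases hb : b.1 <;> cases hc : c.1 <;> simp_all
  rcases h1 with h1 | ⟨h1, h1'⟩ <;> rcases h2 with h2 | ⟨h2, h2'⟩
  · exact Or.inl (lt_trans h1 h2)
  · exact Or.inl (h2 ▸ h1)
  · exact Or.inl (h1 ▸ h2)
  · exact Or.inr ⟨h1.trans h2, le_trans h2' h1'⟩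

-- ===== B-side fold characterisation =====
lemma foldB_char (L : List (String × Int)) : ∀ (acc : Option String × Int), accWF acc →
    accWF (L.foldl dominantStepB acc)
    ∧ accLE acc (L.foldl dominantStepB acc)
    ∧ (∀ x ∈ L, 0 ≤ x.2 → candLE x (L.foldl dominantStepB acc))
    ∧ ((L.foldl dominantStepB acc) = acc ∨ ∃ x ∈ L, (L.foldl dominantStepB acc) = (some x.1, x.2) ∧ 0 ≤ x.2) := by
  intro acc hwf
  induction L generalizing acc with
  | nil => exact ⟨hwf, accLE_refl acc, by simp, Or.inl rfl⟩
  | cons x L ih =>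
    have hstep : accWF (dominantStepB acc x) ∧ accLE acc (dominantStepB acc x)
        ∧ (0 ≤ x.2 → candLE x (dominantStepB acc x))
        ∧ (dominantStepB acc x = acc ∨ (dominantStepB acc x = (some x.1, x.2) ∧ 0 ≤ x.2)) := by
      unfold dominantStepB accWF accLE candLE at *
      cases ha : acc.1 with
      | none =>
        simp only
        split_ifs with h
        · have := hwf.1 ha
          refine ⟨⟨by simp, by simp; omega⟩, by simp, fun _ => by simp, Or.inr ⟨rfl, by omega⟩⟩
        · exact ⟨hwf, by simp, fun h0 => absurd (by have := hwf.1 ha; omega) h, Or.inl rfl⟩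
      | some bk =>
        simp only
        split_ifs with h
        · have hv0 : 0 ≤ x.2 := by have := hwf.2 bk ha; rcases h with h | ⟨h, _⟩ <;> omega
          refine ⟨⟨by simp, by simp; omega⟩, ?_, fun _ => by simp, Or.inr ⟨rfl, hv0⟩⟩
          simp only
          rcases h with h | ⟨h, h'⟩
          · exact Or.inl h
          · exact Or.inr ⟨h.symm, le_of_lt h'⟩
        · push_neg at h
          refine ⟨hwf, by simp [ha], fun h0 => ?_, Or.inl rfl⟩
          simp only [ha]
          rcases lt_or_eq_of_le h.1 with h1 | h1
          · exact Or.inl h1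
          · exact Or.inr ⟨h1, le_of_not_gt (h.2 h1)⟩
    obtain ⟨ihwf, ihle, ihcand, ihmem⟩ := ih (dominantStepB acc x) hstep.1
    refine ⟨by simpa using ihwf, ?_, ?_, ?_⟩
    · simpa using accLE_trans hstep.2.1 ihle
    · intro y hy h0
      simp only [List.foldl_cons]
      rcases List.mem_cons.mp hy with rfl | hy
      · exact candLE_of_candLE_accLE (hstep.2.2.1 h0) ihle
      · exact ihcand y hy h0
    · simp only [List.foldl_cons]
      rcases ihmem with heq | ⟨y, hy, hr⟩
      · rcases hstep.2.2.2 with h | ⟨h, h0⟩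
        · exact Or.inl (heq.trans h)
        · exact Or.inr ⟨x, List.mem_cons_self, heq.trans h, h0⟩
      · exact Or.inr ⟨y, List.mem_cons_of_mem x hy, hr⟩

-- ===== A-side fold characterisation (over strictly increasing keys) =====
lemma foldA_char (d : PySem.Dict String Int) (ks : List String) :
    ∀ (acc : Option String × Int), accWF acc → ks.Pairwise (· < ·) →
    (∀ bk, acc.1 = some bk → ∀ k ∈ ks, bk < k) →
    accWF (ks.foldl (dominantStepA d) acc)
    ∧ accLE acc (ks.foldl (dominantStepA d) acc)
    ∧ (∀ k ∈ ks, 0 ≤ d.getD k 0 → candLE (k, d.getD k 0) (ks.foldl (dominantStepA d) acc))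
    ∧ ((ks.foldl (dominantStepA d) acc) = acc
        ∨ ∃ k ∈ ks, (ks.foldl (dominantStepA d) acc) = (some k, d.getD k 0) ∧ 0 ≤ d.getD k 0) := by
  intro acc hwf hpw hlt
  induction ks generalizing acc with
  | nil => exact ⟨hwf, accLE_refl acc, by simp, Or.inl rfl⟩
  | cons k ks ih =>
    have hpw' := (List.pairwise_cons.mp hpw).2
    have hklt := (List.pairwise_cons.mp hpw).1
    set v := d.getD k 0 with hv
    have hstep : accWF (dominantStepA d acc k) ∧ accLE acc (dominantStepA d acc k)
        ∧ (0 ≤ v → candLE (k, v) (dominantStepA d acc k))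
        ∧ (dominantStepA d acc k = acc ∨ (dominantStepA d acc k = (some k, v) ∧ 0 ≤ v)) := by
      unfold dominantStepA accWF accLE candLE at *
      simp only [← hv]
      split_ifs with h
      · have h0 : 0 ≤ v := by
          cases ha : acc.1 with
          | none => have := hwf.1 ha; omega
          | some bk => have := hwf.2 bk ha; omega
        refine ⟨⟨by simp, by simp; omega⟩, ?_, fun _ => by simp, Or.inr ⟨rfl, h0⟩⟩
        cases ha : acc.1 <;> simp [ha]; omega
      · push_neg at h
        refine ⟨hwf, by cases ha : acc.1 <;> simp [ha], fun h0 => ?_, Or.inl rfl⟩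
        cases ha : acc.1 with
        | none => have := hwf.1 ha; omega
        | some bk =>
          simp only
          rcases lt_or_eq_of_le h with h1 | h1
          · exact Or.inl h1
          · exact Or.inr ⟨h1, le_of_lt (hlt bk ha k List.mem_cons_self)⟩
    have hlt' : ∀ bk, (dominantStepA d acc k).1 = some bk → ∀ k' ∈ ks, bk < k' := by
      intro bk hbk k' hk'
      rcases hstep.2.2.2 with h | ⟨h, _⟩
      · exact hlt bk (h ▸ hbk) k' (List.mem_cons_of_mem k hk')
      · have : bk = k := by rw [h] at hbk; simpa using hbk.symm
        exact this ▸ hklt k' hk'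
    obtain ⟨ihwf, ihle, ihcand, ihmem⟩ := ih (dominantStepA d acc k) hstep.1 hpw' hlt'
    refine ⟨by simpa using ihwf, ?_, ?_, ?_⟩
    · simpa using accLE_trans hstep.2.1 ihle
    · intro k' hk' h0
      simp only [List.foldl_cons]
      rcases List.mem_cons.mp hk' with rfl | hk'
      · exact candLE_of_candLE_accLE (hstep.2.2.1 h0) ihle
      · exact ihcand k' hk' h0
    · simp only [List.foldl_cons]
      rcases ihmem with heq | ⟨k', hk', hr⟩
      · rcases hstep.2.2.2 with h | ⟨h, h0⟩
        · exact Or.inl (heq.trans h)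
        · exact Or.inr ⟨k, List.mem_cons_self, heq.trans h, h0⟩
      · exact Or.inr ⟨k', List.mem_cons_of_mem k hk', hr⟩

-- ===== VERDICT (by name: the statement is the Claim_ definition above) =====
theorem dominant_key_py_spec : Claim_equal_dominant_key_py := by
  unfold Claim_equal_dominant_key_py Spec_dominant_key_py
  intro counter _
  unfold dominant_key_py dominant_key_py_alt
  set d := PySem.Dict.ofList counter with hd
  have hnd : d.keys.Nodup := PySem.Dict.nodup_keys_ofList counter
  have hitems : d.items = d.keys.map (fun k => (k, d.getD k 0)) :=
    PySem.Dict.items_eq_map_keys d hnd 0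
  set ks := PySem.List.sorted d.keys (fun k => k) false with hks
  have hperm : ks.Perm d.keys := PySem.List.sorted_perm d.keys _ false
  have hpw : ks.Pairwise (· < ·) := by
    have hle : ks.Pairwise (fun a b => a ≤ b) := PySem.List.sorted_pairwise d.keys _
    have hnd' : ks.Pairwise (· ≠ ·) := (hperm.nodup_iff.mpr hnd)
    exact (hle.and hnd').imp (fun ⟨h1, h2⟩ => lt_of_le_of_ne h1 h2)
  obtain ⟨_, _, hAc, hAm⟩ := foldA_char d ks (none, -1) ⟨fun _ => rfl, by simp⟩ hpw (by simp)
  obtain ⟨_, _, hBc, hBm⟩ := foldB_char d.items (none, -1) ⟨fun _ => rfl, by simp⟩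
  set rA := ks.foldl (dominantStepA d) (none, -1) with hrA
  set rB := d.items.foldl dominantStepB (none, -1) with hrB
  show rA.1 = rB.1
  -- candidate transfer: items of d are exactly (k, getD k 0) for k ∈ ks
  have hmemitems : ∀ k, k ∈ ks → (k, d.getD k 0) ∈ d.items := by
    intro k hk
    rw [hitems]
    exact List.mem_map_of_mem (hperm.mem_iff.mp hk)
  have hmemks : ∀ x, x ∈ d.items → x.1 ∈ ks ∧ x.2 = d.getD x.1 0 := by
    intro x hx
    rw [hitems] at hx
    obtain ⟨k, hk, rfl⟩ := List.mem_map.mp hx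
    exact ⟨hperm.mem_iff.mpr hk, rfl⟩
  rcases hAm with hA0 | ⟨k, hk, hAk, hA0⟩
  · rcases hBm with hB0 | ⟨x, hx, hBx, hB0⟩
    · rw [hA0, hB0]
    · -- A found nothing but B found x : contradiction with A's dominance over candidate x
      exfalso
      obtain ⟨hx1, hx2⟩ := hmemks x hx
      have := hAc x.1 hx1 (hx2 ▸ hB0)
      rw [hA0] at this
      simpa [candLE] using this
  · rcases hBm with hB0 | ⟨x, hx, hBx, hB0⟩
    · exfalso
      have := hBc (k, d.getD k 0) (hmemitems k hk) hA0
      rw [hB0] at this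
      simpa [candLE] using this
    · -- both found one: mutual dominance forces the same key
      obtain ⟨hx1, hx2⟩ := hmemks x hx
      have h1 : candLE (k, d.getD k 0) rB := hBc (k, d.getD k 0) (hmemitems k hk) hA0
      have h2 : candLE (x.1, d.getD x.1 0) rA := hAc x.1 hx1 (hx2 ▸ hB0)
      rw [hBx] at h1 ⊢
      rw [hAk] at h2 ⊢
      simp only [candLE] at h1 h2
      rw [← hx2] at h2
      have : k = x.1 := by
        rcases h1 with h1 | ⟨h1, h1'⟩ <;> rcases h2 with h2 | ⟨h2, h2'⟩ <;>
          first
          | exact le_antisymm h2' h1'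
          | (exfalso; omega)
      simp [this]
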